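-- pv_equiv track=rewrite | github.com/felipepmaciel/AdventOfCode2023 | Q1/Q1.py | get_line_first_or_last_string_value_index
-- ===== SOURCE A (Python) =====
-- named_numbers_list = [
--     "one",
--     "two",
--     "three",
--     "four",
--     "five",
--     "six",
--     "seven",
--     "eight",
--     "nine",
-- ]
--
-- def get_line_first_or_last_string_value_index(line: str, first_or_last: str):
--     string_numbers = {}
--     for number in named_numbers_list:
--         if first_or_last == "first":
--             index = line.find(number)
--         else:
--             index = line.rfind(number)
--         if index != -1:
--             string_numbers[number] = index
--             continue
--     if string_numbers:
--         if first_or_last == "first":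
--             first_occurrence_key = min(string_numbers, key=string_numbers.get)
--             first_occurrence_index = string_numbers[first_occurrence_key]
--             return first_occurrence_index, first_occurrence_key
--         last_occurrence_key = max(string_numbers, key=string_numbers.get)
--         last_occurrence_index = string_numbers[last_occurrence_key]
--         return last_occurrence_index, last_occurrence_key
--     else:
--         return -1, number
-- ===== SOURCE B (Python) =====
-- named_numbers_list = [
--     "one",
--     "two",
--     "three",
--     "four",
--     "five",
--     "six",
--     "seven",
--     "eight",
--     "nine",
-- ]
--
-- def get_line_first_or_last_string_value_index(line: str, first_or_last: str):
--     best_index = -1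
--     best_key = None
--     for number in named_numbers_list:
--         index = line.find(number) if first_or_last == "first" else line.rfind(number)
--         if index == -1:
--             continue
--         if best_key is None or (index < best_index if first_or_last == "first" else index > best_index):
--             best_index, best_key = index, number
--     if best_key is None:
--         return -1, "nine"
--     return best_index, best_key
-- ===== Notes on version B (the rewrite author's own statement) =====
-- stated objective: simpler
-- what changed: B fuses A's dict-building pass and the subsequent min/max(key=get) selection into one running-best pass with strict-improvement updates (no dict at all), returning (-1, 'nine') when no word occurs.
import Mathlib
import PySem

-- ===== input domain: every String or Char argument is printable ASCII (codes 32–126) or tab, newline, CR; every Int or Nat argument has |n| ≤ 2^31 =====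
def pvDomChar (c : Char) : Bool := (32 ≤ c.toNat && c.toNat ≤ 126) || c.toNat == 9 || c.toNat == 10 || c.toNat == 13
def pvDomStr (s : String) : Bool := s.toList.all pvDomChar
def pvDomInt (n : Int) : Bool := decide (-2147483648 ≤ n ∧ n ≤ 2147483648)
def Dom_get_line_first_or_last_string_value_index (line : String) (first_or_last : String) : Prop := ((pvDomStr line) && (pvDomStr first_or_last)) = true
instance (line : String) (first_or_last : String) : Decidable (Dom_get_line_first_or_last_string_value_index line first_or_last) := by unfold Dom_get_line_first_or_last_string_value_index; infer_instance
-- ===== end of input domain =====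

-- B replaces A's build-a-dict-then-min/max(key=get) with a single running-best pass (same cost; objective: simpler).

def namedNumbersList : List String :=
  ["one", "two", "three", "four", "five", "six", "seven", "eight", "nine"]

-- ===== PORT A =====
def get_line_first_or_last_string_value_index (line : String) (first_or_last : String) : Int × String :=
  let string_numbers : PySem.Dict String Int :=
    namedNumbersList.foldl
      (fun d number =>
        let index : Int :=
          if first_or_last == "first" then PySem.Str.find line number
          else PySem.Str.rfind line number
        if index ≠ -1 then d.insert number index else d)
      PySem.Dict.empty
  if string_numbers.items ≠ [] then
    if first_or_last == "first" then
      match PySem.List.min? string_numbers.keys (fun k => string_numbers.getD k 0) with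
      | some k => (string_numbers.getD k 0, k)
      | none => (-1, "nine")
    else
      match PySem.List.max? string_numbers.keys (fun k => string_numbers.getD k 0) with
      | some k => (string_numbers.getD k 0, k)
      | none => (-1, "nine")
  else
    (-1, "nine")   -- the loop variable `number` ends as the last list element, "nine"

-- ===== PORT B =====
def get_line_first_or_last_string_value_index_alt (line : String) (first_or_last : String) : Int × String :=
  let best : Int × Option String :=
    namedNumbersList.foldl
      (fun st number =>
        let index : Int :=
          if first_or_last == "first" then PySem.Str.find line number
          else PySem.Str.rfind line number
        if index = -1 then st
        else if st.2.isNone = true ∨ (if first_or_last == "first" then index < st.1 else st.1 < index) then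
          (index, some number)
        else st)
      (-1, none)
  match best.2 with
  | some k => (best.1, k)
  | none => (-1, "nine")

-- ===== PRECONDITION & SPEC =====
def Spec_get_line_first_or_last_string_value_index (line : String) (first_or_last : String) (out : Int × String) : Prop := out = get_line_first_or_last_string_value_index_alt line first_or_last
instance (line : String) (first_or_last : String) (out : Int × String) : Decidable (Spec_get_line_first_or_last_string_value_index line first_or_last out) := by unfold Spec_get_line_first_or_last_string_value_index; infer_instance

-- ===== CLAIM (what is proved, stated in full; the proofs are below) =====
def Claim_equal_get_line_first_or_last_string_value_index : Prop := ∀ (line : String) (first_or_last : String), Dom_get_line_first_or_last_string_value_index line first_or_last → Spec_get_line_first_or_last_string_value_index line first_or_last (get_line_first_or_last_string_value_index line first_or_last)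

-- ===== LEMMAS AND PROOFS =====

-- the running step of Python's min/max(key=…) (first extremal element wins), over comparison cmp
def pvSelStep (cmp : Int → Int → Prop) [DecidableRel cmp] (key : String → Int)
    (acc : Option String) (x : String) : Option String :=
  match acc with
  | none => some x
  | some m => if cmp (key x) (key m) then some x else some m

def pvSel (cmp : Int → Int → Prop) [DecidableRel cmp] (xs : List String) (key : String → Int) :
    Option String :=
  xs.foldl (pvSelStep cmp key) none

theorem pvMin_eq (xs : List String) (key : String → Int) :
    PySem.List.min? xs key = pvSel (fun a b => a < b) xs key := by
  simp only [PySem.List.min?, pvSel]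
  congr 1
  funext acc x
  cases acc with
  | none => rfl
  | some m => exact if_congr Iff.rfl rfl rfl

theorem pvMax_eq (xs : List String) (key : String → Int) :
    PySem.List.max? xs key = pvSel (fun a b => b < a) xs key := by
  simp only [PySem.List.max?, pvSel]
  congr 1
  funext acc x
  cases acc with
  | none => rfl
  | some m => exact if_congr Iff.rfl rfl rfl

theorem pvSelStep_out {cmp : Int → Int → Prop} [DecidableRel cmp] {key : String → Int}
    {acc : Option String} {x m : String} (h : pvSelStep cmp key acc x = some m) :
    m = x ∨ acc = some m := by
  cases acc with
  | none => exact Or.inl (by injection h with h'; exact h'.symm)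
  | some m' =>
    simp only [pvSelStep] at h
    split at h
    · exact Or.inl (by injection h with h'; exact h'.symm)
    · exact Or.inr (by injection h with h'; rw [h'])

theorem pvFold_congr (cmp : Int → Int → Prop) [DecidableRel cmp] (k1 k2 : String → Int) :
    ∀ (xs : List String) (acc : Option String),
      (∀ x ∈ xs, k1 x = k2 x) → (∀ m, acc = some m → k1 m = k2 m) →
      xs.foldl (pvSelStep cmp k1) acc = xs.foldl (pvSelStep cmp k2) acc := by
  intro xs
  induction xs with
  | nil => intro acc _ _; rfl
  | cons x t ih =>
    intro acc hxs hacc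
    have hx : k1 x = k2 x := hxs x (List.mem_cons_self ..)
    simp only [List.foldl_cons]
    have hstep : pvSelStep cmp k1 acc x = pvSelStep cmp k2 acc x := by
      cases acc with
      | none => rfl
      | some m => simp only [pvSelStep, hx, hacc m rfl]
    rw [hstep]
    refine ih _ (fun y hy => hxs y (List.mem_cons_of_mem _ hy)) ?_
    intro m hm
    rcases pvSelStep_out hm with h | h
    · rw [h]; exact hx
    · exact hacc m h

theorem pvSel_congr (cmp : Int → Int → Prop) [DecidableRel cmp] (xs : List String)
    (k1 k2 : String → Int) (h : ∀ x ∈ xs, k1 x = k2 x) : pvSel cmp xs k1 = pvSel cmp xs k2 :=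
  pvFold_congr cmp k1 k2 xs none h (fun m hm => by cases hm)

theorem pvSel_append (cmp : Int → Int → Prop) [DecidableRel cmp] (xs : List String) (w : String)
    (key : String → Int) :
    pvSel cmp (xs ++ [w]) key = pvSelStep cmp key (pvSel cmp xs key) w := by
  simp [pvSel, List.foldl_append]

theorem pvFold_mem {cmp : Int → Int → Prop} [DecidableRel cmp] {key : String → Int} :
    ∀ {xs : List String} {acc : Option String} {m : String},
      xs.foldl (pvSelStep cmp key) acc = some m → acc = some m ∨ m ∈ xs := by
  intro xs
  induction xs with
  | nil => intro acc m h; exact Or.inl h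
  | cons x t ih =>
    intro acc m h
    simp only [List.foldl_cons] at h
    rcases ih h with h' | h'
    · rcases pvSelStep_out h' with h'' | h''
      · exact Or.inr (h'' ▸ List.mem_cons_self ..)
      · exact Or.inl h''
    · exact Or.inr (List.mem_cons_of_mem _ h')

theorem pvSel_mem {cmp : Int → Int → Prop} [DecidableRel cmp] {xs : List String}
    {key : String → Int} {m : String} (h : pvSel cmp xs key = some m) : m ∈ xs := by
  rcases pvFold_mem h with h' | h'
  · cases h'
  · exact h'

-- the invariant tying A's dict to B's (best_index, best_key) state
def pvInv (cmp : Int → Int → Prop) [DecidableRel cmp] (d : PySem.Dict String Int)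
    (st : Int × Option String) : Prop :=
  (st.2 = none → d = PySem.Dict.empty) ∧
  (∀ k, st.2 = some k →
    pvSel cmp d.keys (fun x => d.getD x 0) = some k ∧ d.getD k 0 = st.1)

theorem pv_loop_inv (cmp : Int → Int → Prop) [DecidableRel cmp] (f : String → Int) :
    ∀ (ws : List String) (d : PySem.Dict String Int) (st : Int × Option String),
      ws.Nodup → (∀ w ∈ ws, d.contains w = false) → pvInv cmp d st →
      pvInv cmp
        (ws.foldl (fun d n => if f n ≠ -1 then d.insert n (f n) else d) d)
        (ws.foldl (fun st n =>
            if f n = -1 then st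
            else if st.2.isNone = true ∨ cmp (f n) st.1 then (f n, some n)
            else st) st) := by
  intro ws
  induction ws with
  | nil => intro d st _ _ h; exact h
  | cons w t ih =>
    intro d st hnd hfresh hinv
    have hwd : d.contains w = false := hfresh w (List.mem_cons_self ..)
    have hwt : w ∉ t := (List.nodup_cons.mp hnd).1
    have hndt : t.Nodup := (List.nodup_cons.mp hnd).2
    simp only [List.foldl_cons]
    by_cases hi : f w = -1
    · rw [if_neg (by simp [hi]), if_pos hi]
      exact ih d st hndt (fun x hx => hfresh x (List.mem_cons_of_mem _ hx)) hinv
    · rw [if_pos hi, if_neg hi]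
      have hfresh' : ∀ x ∈ t, (d.insert w (f w)).contains x = false := by
        intro x hx
        rw [PySem.Dict.contains_insert]
        have hxw : x ≠ w := fun h => hwt (h ▸ hx)
        simp [hxw, hfresh x (List.mem_cons_of_mem _ hx)]
      have hkeys : (d.insert w (f w)).keys = d.keys ++ [w] :=
        PySem.Dict.keys_insert_of_not_contains d (f w) hwd
      have hwkeys : w ∉ d.keys := fun h =>
        by rw [(PySem.Dict.contains_iff_mem_keys d w).mpr h] at hwd; cases hwd
      rcases hst2 : st.2 with _ | k
      · -- no best yet: A's dict is empty, B takes the new word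
        have hd : d = PySem.Dict.empty := hinv.1 hst2
        rw [if_pos (Or.inl Option.isNone_none)]
        refine ih _ _ hndt hfresh' ?_
        unfold pvInv
        refine ⟨fun h => ?_, fun k hk => ?_⟩
        · simp at h
        simp only [Option.some.injEq] at hk
        subst hk; subst hd
        refine ⟨?_, PySem.Dict.getD_insert_self ..⟩
        rw [hkeys, PySem.Dict.keys_empty, List.nil_append]
        rfl
      · -- best so far is k: compare the new index against the stored extremum
        have hk := hinv.2 k hst2
        have hkmem : k ∈ d.keys := pvSel_mem hk.1
        have hkw : k ≠ w := fun h => hwkeys (h ▸ hkmem)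
        have hvalw : (d.insert w (f w)).getD w 0 = f w := PySem.Dict.getD_insert_self ..
        have hvalk : (d.insert w (f w)).getD k 0 = st.1 := by
          rw [PySem.Dict.getD_insert_of_ne d (f w) 0 hkw]; exact hk.2
        have hsel : pvSel cmp (d.insert w (f w)).keys (fun x => (d.insert w (f w)).getD x 0)
            = if cmp (f w) st.1 then some w else some k := by
          rw [hkeys, pvSel_append]
          have hcong : pvSel cmp d.keys (fun x => (d.insert w (f w)).getD x 0)
              = pvSel cmp d.keys (fun x => d.getD x 0) :=
            pvSel_congr cmp d.keys _ _
              (fun x hx => PySem.Dict.getD_insert_of_ne d (f w) 0 (fun h => hwkeys (h ▸ hx)))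
          rw [hcong, hk.1]
          simp only [pvSelStep, hvalw, hvalk]
        simp only [Option.isNone_some, Bool.false_eq_true, false_or]
        by_cases hc : cmp (f w) st.1
        · rw [if_pos hc]
          refine ih _ _ hndt hfresh' ?_
          unfold pvInv
          refine ⟨fun h => ?_, fun k' hk' => ?_⟩
          · simp at h
          simp only [Option.some.injEq] at hk'
          subst hk'
          exact ⟨by rw [hsel, if_pos hc], hvalw⟩
        · rw [if_neg hc]
          refine ih _ _ hndt hfresh' ?_
          unfold pvInv
          refine ⟨fun h => ?_, fun k' hk' => ?_⟩
          · rw [h] at hst2; cases hst2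
          rw [hst2] at hk'
          simp only [Option.some.injEq] at hk'
          subst hk'
          exact ⟨by rw [hsel, if_neg hc], hvalk⟩

-- full pipeline, for one comparison direction
theorem pv_main (cmp : Int → Int → Prop) [DecidableRel cmp] (f : String → Int) :
    (if (namedNumbersList.foldl (fun d n => if f n ≠ -1 then d.insert n (f n) else d)
          PySem.Dict.empty).items ≠ [] then
      match pvSel cmp (namedNumbersList.foldl (fun d n => if f n ≠ -1 then d.insert n (f n) else d)
              PySem.Dict.empty).keys
            (fun k => (namedNumbersList.foldl (fun d n => if f n ≠ -1 then d.insert n (f n) else d)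
              PySem.Dict.empty).getD k 0) with
      | some k => ((namedNumbersList.foldl (fun d n => if f n ≠ -1 then d.insert n (f n) else d)
              PySem.Dict.empty).getD k 0, k)
      | none => ((-1 : Int), "nine")
    else ((-1 : Int), "nine"))
    = match (namedNumbersList.foldl (fun st n =>
          if f n = -1 then st
          else if st.2.isNone = true ∨ cmp (f n) st.1 then (f n, some n)
          else st) ((-1 : Int), (none : Option String))).2 with
      | some k => ((namedNumbersList.foldl (fun st n =>
          if f n = -1 then st
          else if st.2.isNone = true ∨ cmp (f n) st.1 then (f n, some n)
          else st) ((-1 : Int), (none : Option String))).1, k)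
      | none => ((-1 : Int), "nine") := by
  have hinv := pv_loop_inv cmp f namedNumbersList PySem.Dict.empty (-1, none)
    (by decide) (fun w _ => PySem.Dict.contains_empty w) ⟨fun _ => rfl, fun k hk => by cases hk⟩
  set d := namedNumbersList.foldl (fun d n => if f n ≠ -1 then d.insert n (f n) else d)
    PySem.Dict.empty with hd
  set st := namedNumbersList.foldl (fun st n =>
      if f n = -1 then st
      else if st.2.isNone = true ∨ cmp (f n) st.1 then (f n, some n)
      else st) ((-1 : Int), (none : Option String)) with hst
  rcases hst2 : st.2 with _ | k
  · have hdempty : d = PySem.Dict.empty := hinv.1 hst2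
    rw [hdempty]
    simp [PySem.Dict.empty]
  · have hk := hinv.2 k hst2
    have hkmem : k ∈ d.keys := pvSel_mem hk.1
    have hne : d.items ≠ [] := by
      intro hnil
      rw [PySem.Dict.keys, hnil] at hkmem
      cases hkmem
    rw [if_pos hne, hk.1]
    simp [hk.2]

-- ===== VERDICT (by name: the statement is the Claim_ definition above) =====
theorem get_line_first_or_last_string_value_index_spec : Claim_equal_get_line_first_or_last_string_value_index := by
  intro line first_or_last _
  unfold Spec_get_line_first_or_last_string_value_index
  simp only [get_line_first_or_last_string_value_index, get_line_first_or_last_string_value_index_alt]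
  cases hF : (first_or_last == "first") with
  | true =>
    simp only [if_true, pvMin_eq]
    exact pv_main (fun a b => a < b) (fun n => PySem.Str.find line n)
  | false =>
    simp only [Bool.false_eq_true, if_false, pvMax_eq]
    exact pv_main (fun a b => b < a) (fun n => PySem.Str.rfind line n)
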